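-- pv_equiv track=rewrite | github.com/Oliver0047/Diabetes | feature_engineering/missing_count.py | missing_count
-- ===== SOURCE A (Python) =====
-- def missing_count(data):
--     num=[]
--     kind=[]
--     for d in data:
--         miss=[]
--         for i in range(len(d)):
--             if d[i] is None:
--                 miss.append(i)
--         if miss not in kind and miss!=[]:
--             kind.append(miss)
--             num.append(1)
--         elif miss in kind and miss!=[]:
--             num[kind.index(miss)]+=1
--     return (num,kind)
-- ===== SOURCE B (Python) =====
-- def missing_count(data):
--     # Staged, declarative pipeline: build every row's missing-index pattern,
--     # drop the empty ones, take the distinct patterns in first-seen order,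
--     # then count each distinct pattern over the whole pattern list.
--     pats = [tuple(i for i, v in enumerate(d) if v is None) for d in data]
--     pats = [p for p in pats if p]
--     kinds = list(dict.fromkeys(pats))
--     return ([pats.count(k) for k in kinds], [list(k) for k in kinds])
-- ===== Notes on version B (the rewrite author's own statement) =====
-- stated objective: alternative
-- what changed: Replaces A's single stateful loop that classifies each row against the growing kind list (membership test, .index, in-place increment) by a staged declarative pipeline: build the list of all nonempty missing-index patterns, dedupe it in first-seen order with dict.fromkeys, then count each distinct pattern over the whole pattern list.
import Mathlib
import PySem

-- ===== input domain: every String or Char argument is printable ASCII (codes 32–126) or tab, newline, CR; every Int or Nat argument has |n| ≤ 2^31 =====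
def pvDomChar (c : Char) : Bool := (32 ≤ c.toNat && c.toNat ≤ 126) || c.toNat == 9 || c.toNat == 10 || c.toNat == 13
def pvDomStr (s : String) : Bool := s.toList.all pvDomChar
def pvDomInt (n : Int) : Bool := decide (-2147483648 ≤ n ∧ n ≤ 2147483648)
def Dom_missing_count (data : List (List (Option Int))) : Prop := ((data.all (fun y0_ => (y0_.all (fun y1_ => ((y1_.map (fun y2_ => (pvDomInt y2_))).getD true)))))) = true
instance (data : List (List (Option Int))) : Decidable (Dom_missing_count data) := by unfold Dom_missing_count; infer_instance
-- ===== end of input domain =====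

-- B replaces A's single stateful classify-as-you-go loop by a staged pipeline: all
-- patterns, filter nonempty, first-seen dedup, count each (objective: alternative).

-- ===== PORT A =====
-- miss = []; for i in range(len(d)): if d[i] is None: miss.append(i)
def mcMiss (d : List (Option Int)) : List Int :=
  (PySem.List.pyRange 0 (PySem.List.len d) 1).foldl
    (fun miss i => if PySem.List.pyGetD d i (some 0) = none then miss ++ [i] else miss) []

-- one iteration of A's loop over `data`; state is (num, kind)
def mcStep (st : List Int × List (List Int)) (d : List (Option Int)) : List Int × List (List Int) :=
  let miss := mcMiss d
  if miss ∉ st.2 ∧ miss ≠ [] then (st.1 ++ [1], st.2 ++ [miss])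
  else if miss ∈ st.2 ∧ miss ≠ [] then
    -- num[kind.index(miss)] += 1 ; the index is always in range since miss ∈ kind
    match PySem.List.index? st.2 miss with
    | some j => (st.1.set j (st.1.getD j 0 + 1), st.2)
    | none => st
  else st

def missing_count (data : List (List (Option Int))) : List Int × List (List Int) :=
  data.foldl mcStep ([], [])

-- ===== PORT B =====
-- tuple(i for i, v in enumerate(d) if v is None)
def mcAltMiss (d : List (Option Int)) : List Int :=
  ((PySem.List.enumerate d).filter (fun p => decide (p.2 = none))).map (·.1)

-- pats = [... for d in data]; pats = [p for p in pats if p]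
def mcPats (data : List (List (Option Int))) : List (List Int) :=
  (data.map mcAltMiss).filter (fun p => decide (p ≠ []))

-- kinds = list(dict.fromkeys(pats)) — PySem.List.dedup IS list(dict.fromkeys(·));
-- return ([pats.count(k) for k in kinds], [list(k) for k in kinds])
def missing_count_alt (data : List (List (Option Int))) : List Int × List (List Int) :=
  let pats := mcPats data
  let kinds := PySem.List.dedup pats
  (kinds.map (fun k => (PySem.List.count pats k : Int)), kinds)

-- ===== PRECONDITION & SPEC =====
def Spec_missing_count (data : List (List (Option Int))) (out : List Int × List (List Int)) : Prop := out = missing_count_alt data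
instance (data : List (List (Option Int))) (out : List Int × List (List Int)) : Decidable (Spec_missing_count data out) := by unfold Spec_missing_count; infer_instance

-- ===== CLAIM =====
def Claim_equal_missing_count : Prop := ∀ (data : List (List (Option Int))), Dom_missing_count data → Spec_missing_count data (missing_count data)

-- ===== LEMMAS AND PROOFS =====

-- the two per-row pattern computations agree
theorem mcMiss_eq_alt (d : List (Option Int)) : mcMiss d = mcAltMiss d := by
  unfold mcMiss mcAltMiss
  rw [PySem.List.foldl_append_ite_eq_filter, PySem.List.enumerate_eq_map_pyRange (d := some 0),
      List.filter_map, List.map_map]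
  simp [Function.comp_def]

-- first-seen dedup of a list with one element appended
theorem dedup_snoc (l : List (List Int)) (m : List Int) :
    PySem.List.dedup (l ++ [m]) =
      if m ∈ l then PySem.List.dedup l else PySem.List.dedup l ++ [m] := by
  rw [show PySem.List.dedup (l ++ [m]) = PySem.Set.ofList (l ++ [m]) from rfl,
      PySem.Set.ofList_eq_foldl, List.foldl_append, ← PySem.Set.ofList_eq_foldl]
  have h1 : PySem.Set.ofList l = PySem.List.dedup l := rfl
  simp only [List.foldl_cons, List.foldl_nil, PySem.Set.add, PySem.Set.contains, h1]
  by_cases h : m ∈ l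
  · simp [List.contains_eq_mem, h]
  · simp [List.contains_eq_mem, h]

-- B's result described as a function of the pattern list
def mcOut (pats : List (List Int)) : List Int × List (List Int) :=
  ((PySem.List.dedup pats).map (fun k => (PySem.List.count pats k : Int)), PySem.List.dedup pats)

theorem mcOut_snoc_new (pats : List (List Int)) (m : List Int) (hnm : m ∉ pats) :
    mcOut (pats ++ [m]) = ((mcOut pats).1 ++ [1], (mcOut pats).2 ++ [m]) := by
  unfold mcOut
  rw [dedup_snoc, if_neg hnm]
  simp only [List.map_append, List.map_cons, List.map_nil, PySem.List.count_eq]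
  simp only [Prod.mk.injEq]
  refine ⟨?_, trivial⟩
  congr 1
  · apply List.map_congr_left
    intro k hk
    have hkp : k ∈ pats := (PySem.List.mem_dedup pats k).mp hk
    have hne : k ≠ m := fun e => hnm (e ▸ hkp)
    simp [List.count_append, List.count_eq_zero.mpr (by simp [hne] : k ∉ [m])]
  · simp [List.count_append, List.count_eq_zero_of_not_mem hnm]

theorem mcOut_snoc_old (pats : List (List Int)) (m : List Int) (hm : m ∈ pats) (j : Nat)
    (hj : PySem.List.index? (PySem.List.dedup pats) m = some j) :
    mcOut (pats ++ [m]) = (((mcOut pats).1).set j (((mcOut pats).1).getD j 0 + 1), (mcOut pats).2) := by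
  unfold mcOut
  rw [dedup_snoc, if_pos hm]
  simp only [Prod.mk.injEq, PySem.List.count_eq]
  refine ⟨?_, trivial⟩
  obtain ⟨hjlt, hDj, _⟩ := PySem.List.getElem_of_index?_eq_some hj
  set D := PySem.List.dedup pats with hD
  have hnd : D.Nodup := PySem.List.nodup_dedup pats
  have hgetD : (D.map (fun k => (List.count k pats : Int))).getD j 0 = (List.count m pats : Int) := by
    rw [List.getD_eq_getElem _ _ (by simpa using hjlt), List.getElem_map, hDj]
  rw [hgetD]
  apply List.ext_getElem
  · simp
  · intro i hi1 hi2
    have hiD : i < D.length := by simpa using hi1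
    rw [List.getElem_map]
    rw [List.getElem_set]
    by_cases hij : j = i
    · subst hij
      rw [if_pos rfl, hDj]
      simp [List.count_append]
    · rw [if_neg hij, List.getElem_map]
      have hne : D[i] ≠ m := by
        rw [← hDj]
        intro he
        exact hij ((List.Nodup.getElem_inj_iff hnd).mp he.symm)
      simp [List.count_append, List.count_eq_zero.mpr (by simp [hne] : D[i] ∉ [m])]

-- A's fold computes mcOut of the pattern list
theorem mc_char (data : List (List (Option Int))) :
    data.foldl mcStep ([], []) = mcOut (mcPats data) := by
  induction data using List.reverseRecOn with
  | nil => rfl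
  | append_singleton ds d ih =>
    rw [List.foldl_append, List.foldl_cons, List.foldl_nil, ih]
    have hpats : mcPats (ds ++ [d]) =
        mcPats ds ++ List.filter (fun p => decide (p ≠ [])) [mcAltMiss d] := by
      unfold mcPats; rw [List.map_append, List.filter_append]; rfl
    by_cases hm : mcMiss d = []
    · have : List.filter (fun p => decide (p ≠ [])) [mcAltMiss d] = [] := by
        simp [← mcMiss_eq_alt, hm]
      rw [hpats, this, List.append_nil]
      unfold mcStep
      simp [hm]
    · have hfil : List.filter (fun p => decide (p ≠ [])) [mcAltMiss d] = [mcMiss d] := by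
        simp [← mcMiss_eq_alt, hm]
      rw [hpats, hfil]
      by_cases hmem : mcMiss d ∈ mcPats ds
      · have hmd : mcMiss d ∈ (mcOut (mcPats ds)).2 := by
          unfold mcOut
          exact (PySem.List.mem_dedup _ _).mpr hmem
        obtain ⟨j, hj⟩ : ∃ j, PySem.List.index? (mcOut (mcPats ds)).2 (mcMiss d) = some j := by
          have := (PySem.List.index?_isSome_iff ((mcOut (mcPats ds)).2) (mcMiss d)).mpr hmd
          exact Option.isSome_iff_exists.mp this
        unfold mcStep
        rw [if_neg (by simp [hmd]), if_pos ⟨hmd, hm⟩, hj,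
            mcOut_snoc_old (mcPats ds) (mcMiss d) hmem j hj]
      · have hmd : mcMiss d ∉ (mcOut (mcPats ds)).2 := by
          unfold mcOut
          exact fun h => hmem ((PySem.List.mem_dedup _ _).mp h)
        unfold mcStep
        rw [if_pos ⟨hmd, hm⟩, mcOut_snoc_new (mcPats ds) (mcMiss d) hmem]

-- ===== VERDICT =====
theorem missing_count_spec : Claim_equal_missing_count := by
  intro data _
  unfold Spec_missing_count missing_count missing_count_alt
  exact mc_char data
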